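-- pv_equiv track=rewrite | github.com/krec-kiran/Python-code | ticket_queue_2.py | queue
-- ===== SOURCE A (Python) =====
-- def queue(q, i):
--     tickets = q[i]
--     time = 0
--     while tickets > 1:
--         q[:] = [x - 1 for x in q]
--         length = sum([1 for x in q if x >= 0])
--         time += length
--         tickets -= 1
--     k = [x for x in q[:i + 1] if x > 0]
--     ahead = len(k)
--     time += ahead
--     return(time)
-- ===== SOURCE B (Python) =====
-- def queue(q, i):
--     t = q[i]
--     m = max(t - 1, 0)
--     time = sum(min(x, m) for x in q if x > 0)
--     ahead = sum(1 for x in q[:i + 1] if x - m > 0)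
--     return time + ahead
-- ===== Notes on version B (the rewrite author's own statement) =====
-- stated objective: alternative
-- what changed: Replaces the ticket-by-ticket simulation loop (which decrements the whole queue q[i]-1 times) with a closed-form single pass: sum of min(x, t-1) over positive entries plus a count of entries up to position i that still exceed t-1.
import Mathlib
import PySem

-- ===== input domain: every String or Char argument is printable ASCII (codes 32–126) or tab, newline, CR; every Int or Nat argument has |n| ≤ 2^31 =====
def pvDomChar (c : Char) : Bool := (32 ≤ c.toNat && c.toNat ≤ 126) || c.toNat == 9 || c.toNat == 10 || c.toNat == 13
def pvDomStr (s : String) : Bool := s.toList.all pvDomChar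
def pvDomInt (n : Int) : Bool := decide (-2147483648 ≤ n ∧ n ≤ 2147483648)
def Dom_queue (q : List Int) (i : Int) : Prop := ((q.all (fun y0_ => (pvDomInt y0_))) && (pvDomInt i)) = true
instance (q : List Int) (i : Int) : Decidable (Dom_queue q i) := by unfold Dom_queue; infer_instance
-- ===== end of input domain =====

-- B replaces A's whole-queue simulation loop by a closed-form single pass over the list.
-- A mutates q in place (q[:] = ...); the equivalence proved here is about the return value only — B does not mutate.

-- ===== PORT A =====
-- while tickets > 1: q[:] = [x-1 for x in q]; time += sum([1 for x in q if x >= 0]); tickets -= 1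
def queueLoopA (q : List Int) (tickets : Int) (time : Int) : List Int × Int :=
  if h : tickets > 1 then
    let q' := q.map (fun x => x - 1)
    let length := ((q'.filter (fun x => x ≥ 0)).map (fun _ => (1 : Int))).sum
    queueLoopA q' (tickets - 1) (time + length)
  else (q, time)
termination_by tickets.toNat
decreasing_by omega

def queue (q : List Int) (i : Int) : Int :=
  match PySem.List.pyGet? q i with
  | none => 0   -- unreachable under Pre_queue: Python raises IndexError here
  | some tickets =>
    let r := queueLoopA q tickets 0
    let k := (PySem.List.slice r.1 none (some (i + 1))).filter (fun x => x > 0)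
    r.2 + (k.length : Int)

-- ===== PORT B =====
def queue_alt (q : List Int) (i : Int) : Int :=
  match PySem.List.pyGet? q i with
  | none => 0   -- unreachable under Pre_queue
  | some t =>
    let m := max (t - 1) 0
    let time := ((q.filter (fun x => x > 0)).map (fun x => min x m)).sum
    let ahead := ((PySem.List.slice q none (some (i + 1))).filter (fun x => x - m > 0)).length
    time + (ahead : Int)

-- ===== PRECONDITION & SPEC =====
-- Pre_: i must be a valid (possibly negative) Python index into q; otherwise A's q[i] raises IndexError.
def Pre_queue (q : List Int) (i : Int) : Prop := PySem.Raise.InRange q.length i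
instance (q : List Int) (i : Int) : Decidable (Pre_queue q i) := by unfold Pre_queue; infer_instance
def pvWitness_queue : List Int × Int := ([2, 5, 3, 4, 6], 2)

def Spec_queue (q : List Int) (i : Int) (out : Int) : Prop := out = queue_alt q i
instance (q : List Int) (i : Int) (out : Int) : Decidable (Spec_queue q i out) := by unfold Spec_queue; infer_instance

-- ===== CLAIM (what is proved, stated in full; the proofs are below) =====
def Claim_equal_queue : Prop := ∀ (q : List Int) (i : Int), Dom_queue q i → Pre_queue q i → Spec_queue q i (queue q i)

-- ===== LEMMAS AND PROOFS =====

-- A's loop does nothing when tickets ≤ 1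
lemma queueLoopA_base (q : List Int) (t time : Int) (ht : t ≤ 1) :
    queueLoopA q t time = (q, time) := by
  rw [queueLoopA, dif_neg (by omega)]

-- one unfolding of A's loop when tickets > 1
lemma queueLoopA_step (q : List Int) (t time : Int) (ht : 1 < t) :
    queueLoopA q t time
      = queueLoopA (q.map (fun x => x - 1)) (t - 1)
          (time + ((((q.map (fun x => x - 1)).filter (fun x => x ≥ 0)).map (fun _ => (1 : Int))).sum)) := by
  rw [queueLoopA, dif_pos ht]

-- one loop iteration folded into the running sum
lemma step_sum (m : Int) (hm : 0 ≤ m) (l : List Int) :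
    (((l.map (fun x => x - 1)).filter (fun x => x ≥ 0)).map (fun _ => (1 : Int))).sum
      + ((l.map (fun x => x - 1)).map (fun x => min (max x 0) m)).sum
    = (l.map (fun x => min (max x 0) (m + 1))).sum := by
  induction l with
  | nil => simp
  | cons x l ih =>
    simp only [List.map_cons, List.filter_cons, List.sum_cons]
    split
    · rename_i h
      simp only [decide_eq_true_eq] at h
      simp only [List.map_cons, List.sum_cons]
      have hx : (1 : Int) + min (max (x - 1) 0) m = min (max x 0) (m + 1) := by omega
      linarith [ih, hx]
    · rename_i h
      simp only [decide_eq_true_eq] at h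
      have hx : min (max (x - 1) 0) m = min (max x 0) (m + 1) := by omega
      linarith [ih, hx]

-- the loop's closed form: the queue is shifted down by m := max (t-1) 0
-- and time gains Σ_x min(max x 0, m)
lemma queueLoopA_closed (t : Int) (q : List Int) (time : Int) :
    queueLoopA q t time
      = (q.map (fun x => x - max (t - 1) 0),
         time + ((q.map (fun x => min (max x 0) (max (t - 1) 0))).sum)) := by
  by_cases h1 : t ≤ 1
  · rw [queueLoopA_base q t time h1]
    have hf : (fun x : Int => x - max (t - 1) 0) = fun x => x := by funext x; omega
    have hg : (fun x : Int => min (max x 0) (max (t - 1) 0)) = fun _ => (0 : Int) := by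
      funext x; omega
    simp [hf, hg]
  · obtain ⟨n, hn⟩ : ∃ n : Nat, t = (n : Int) + 2 := ⟨(t - 2).toNat, by omega⟩
    subst hn
    clear h1
    induction n generalizing q time with
    | zero =>
      rw [queueLoopA_step q _ time (by simp)]
      rw [show ((0 : Nat) : Int) + 2 - 1 = 1 from by simp]
      rw [queueLoopA_base _ 1 _ le_rfl]
      rw [show max (1 : Int) 0 = 1 from by omega]
      refine Prod.ext ?_ ?_
      · rfl
      · have hz : ((q.map (fun x => x - 1)).map (fun x => min (max x 0) 0)).sum = 0 := by
          have he : (fun x : Int => min (max x 0) 0) = fun _ => (0 : Int) := by funext x; omega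
          rw [he]; simp [Function.comp_def, List.map_const']
        have hs := step_sum 0 le_rfl q
        rw [show (0 : Int) + 1 = 1 from by ring] at hs
        simp only []
        omega
    | succ k ih =>
      rw [queueLoopA_step q _ time (by push_cast; omega)]
      rw [show ((k + 1 : Nat) : Int) + 2 - 1 = ((k : Nat) : Int) + 2 from by push_cast; ring]
      rw [ih (q.map (fun x => x - 1)) _]
      rw [show max (((k : Nat) : Int) + 2 - 1) 0 = (k : Int) + 1 from by omega]
      rw [show max (((k : Nat) : Int) + 2) 0 = (k : Int) + 2 from by omega]
      refine Prod.ext ?_ ?_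
      · simp only [List.map_map]
        refine List.map_congr_left fun x _ => ?_
        simp only [Function.comp_apply]
        ring
      · have hs := step_sum ((k : Int) + 1) (by omega) q
        rw [show (k : Int) + 1 + 1 = (k : Int) + 2 from by ring] at hs
        simp only []
        omega

-- slicing commutes with a map (same length, so same clamped bounds)
lemma slice_map (l : List Int) (f : Int → Int) (b : Int) :
    PySem.List.slice (l.map f) none (some b) = (PySem.List.slice l none (some b)).map f := by
  simp [PySem.List.slice, PySem.List.clampIdx]

-- A's Σ min(max x 0, m) over the whole list equals B's Σ min(x, m) over its positive entries
lemma sum_pos_filter (m : Int) (hm : 0 ≤ m) (l : List Int) :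
    (l.map (fun x => min (max x 0) m)).sum
      = ((l.filter (fun x => x > 0)).map (fun x => min x m)).sum := by
  induction l with
  | nil => simp
  | cons x l ih =>
    simp only [List.map_cons, List.sum_cons, List.filter_cons]
    split
    · rename_i h
      simp only [decide_eq_true_eq] at h
      simp only [List.map_cons, List.sum_cons]
      have : min (max x 0) m = min x m := by omega
      omega
    · rename_i h
      simp only [decide_eq_true_eq] at h
      have : min (max x 0) m = 0 := by omega
      omega

-- ===== VERDICT (by name: the statement is the Claim_ definition above) =====
theorem queue_spec : Claim_equal_queue := by
  intro q i _ _
  unfold Spec_queue queue queue_alt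
  cases hget : PySem.List.pyGet? q i with
  | none => rfl
  | some t =>
    simp only [queueLoopA_closed t q 0]
    rw [slice_map, List.filter_map]
    simp only [List.length_map, zero_add]
    rw [sum_pos_filter (max (t - 1) 0) (le_max_right _ _) q]
    simp only [Function.comp_def]
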